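-- pv_equiv track=rewrite | github.com/miliar/Code_Jam_Webscraper | solutions_python/Problem_212/201.py | calc
-- ===== SOURCE A (Python) =====
-- def calc(p,P):
-- 	score = 0
-- 	sum = 0
-- 	for n in p:
-- 		if sum % P == 0:
-- 			score += 1
-- 		sum += n
-- 	return score
-- ===== SOURCE B (Python) =====
-- def calc(p, P):
--     # Divide and conquer: count positions whose preceding sum (base + earlier
--     # elements of this segment) is divisible by P; recurse on halves, shifting
--     # the base for the right half by the left half's sum.
--     def go(seg, base):
--         if len(seg) == 1:
--             return 1 if base % P == 0 else 0
--         m = len(seg) // 2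
--         return go(seg[:m], base) + go(seg[m:], base + sum(seg[:m]))
--     return go(p, 0) if p else 0
-- ===== Notes on version B (the rewrite author's own statement) =====
-- stated objective: alternative
-- what changed: B counts divisible prefix positions by divide and conquer: it recursively splits the list into halves, counting the left half with the current base offset and the right half with the base shifted by the left half's sum, instead of one sequential loop interleaving sum update and check.
import Mathlib
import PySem

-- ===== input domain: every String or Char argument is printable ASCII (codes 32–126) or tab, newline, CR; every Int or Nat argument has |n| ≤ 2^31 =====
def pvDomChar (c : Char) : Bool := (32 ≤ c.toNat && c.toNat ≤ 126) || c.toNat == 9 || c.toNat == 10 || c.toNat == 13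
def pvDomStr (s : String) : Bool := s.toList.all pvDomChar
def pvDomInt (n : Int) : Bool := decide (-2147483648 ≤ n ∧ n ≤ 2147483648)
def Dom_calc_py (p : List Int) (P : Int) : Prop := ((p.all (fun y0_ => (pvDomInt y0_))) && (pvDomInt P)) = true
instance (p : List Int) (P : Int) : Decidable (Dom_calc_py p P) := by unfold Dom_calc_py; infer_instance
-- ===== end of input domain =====

-- B counts divisible prefix positions by divide and conquer over halves (base offset carried right), instead of A's single sequential loop; an alternative decomposition, not faster.


-- ===== PORT A =====
-- one loop: (score, sum); check 'sum % P == 0' before adding n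
def calc_py (p : List Int) (P : Int) : Int :=
  (p.foldl (fun (st : Int × Int) n =>
    ((if PySem.Int.mod st.2 P = 0 then st.1 + 1 else st.1), st.2 + n)) (0, 0)).1

-- ===== PORT B =====
-- go(seg, base): len 1 → check base; else recurse on the two halves, shifting base for the right
-- ([] case is a totality guard: Python's go is never called with an empty segment)
def pvGoB (P : Int) (seg : List Int) (base : Int) : Int :=
  match seg with
  | [] => 0
  | [_] => if PySem.Int.mod base P = 0 then 1 else 0
  | a :: b :: t =>
    let s := a :: b :: t
    let m := s.length / 2
    pvGoB P (s.take m) base + pvGoB P (s.drop m) (base + (s.take m).sum)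
termination_by seg.length
decreasing_by
  · simp; omega
  · simp; omega

def calc_py_alt (p : List Int) (P : Int) : Int :=
  if p = [] then 0 else pvGoB P p 0

-- ===== PRECONDITION & SPEC =====
-- Pre_ excludes exactly the inputs where both Pythons raise ZeroDivisionError: P = 0 with a nonempty p.
def Pre_calc_py (p : List Int) (P : Int) : Prop := p = [] ∨ P ≠ 0
instance (p : List Int) (P : Int) : Decidable (Pre_calc_py p P) := by unfold Pre_calc_py; infer_instance
def pvWitness_calc_py : List Int × Int := ([1, 2, 3, -3], 3)

def Spec_calc_py (p : List Int) (P : Int) (out : Int) : Prop := out = calc_py_alt p P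
instance (p : List Int) (P : Int) (out : Int) : Decidable (Spec_calc_py p P out) := by unfold Spec_calc_py; infer_instance

-- ===== CLAIM (what is proved, stated in full; the proofs are below) =====
def Claim_equal_calc_py : Prop := ∀ (p : List Int) (P : Int), Dom_calc_py p P → Pre_calc_py p P → Spec_calc_py p P (calc_py p P)

-- ===== LEMMAS AND PROOFS =====

-- reference count: running sums s, s+n, ... over p, one check per element
def pvCnt (P : Int) (s : Int) : List Int → Int
  | [] => 0
  | n :: t => (if PySem.Int.mod s P = 0 then 1 else 0) + pvCnt P (s + n) t

lemma calc_py_loop (P : Int) (p : List Int) (score s : Int) :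
    (p.foldl (fun (st : Int × Int) n =>
      ((if PySem.Int.mod st.2 P = 0 then st.1 + 1 else st.1), st.2 + n)) (score, s)).1
    = score + pvCnt P s p := by
  induction p generalizing score s with
  | nil => simp [pvCnt]
  | cons n t ih =>
    simp only [List.foldl_cons, pvCnt, ih]
    split_ifs <;> ring

lemma pvCnt_append (P : Int) (u v : List Int) (s : Int) :
    pvCnt P s (u ++ v) = pvCnt P s u + pvCnt P (s + u.sum) v := by
  induction u generalizing s with
  | nil => simp [pvCnt]
  | cons n t ih => simp [pvCnt, ih, add_assoc]

lemma pvGoB_eq_cnt (P : Int) (seg : List Int) (base : Int) :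
    pvGoB P seg base = pvCnt P base seg := by
  induction seg, base using pvGoB.induct P with
  | case1 b => simp [pvGoB, pvCnt]
  | case2 b x h => simp [pvGoB, pvCnt, h]
  | case3 b x h => rw [pvGoB]; simp [pvCnt, h]
  | case4 bs a b t s m ih1 ih2 =>
    rw [pvGoB]
    rw [ih1, ih2, ← pvCnt_append, List.take_append_drop]

-- ===== VERDICT (by name: the statement is the Claim_ definition above) =====
theorem calc_py_spec : Claim_equal_calc_py := by
  intro p P _ _
  show calc_py p P = calc_py_alt p P
  cases p with
  | nil => rfl
  | cons a t =>
    simp only [calc_py, calc_py_alt, if_neg (List.cons_ne_nil a t), calc_py_loop,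
      pvGoB_eq_cnt, zero_add]
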